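-- pv_equiv track=rewrite | github.com/shikgom2/boj | 16566.py | find_min_greater
-- ===== SOURCE A (Python) =====
-- def find_min_greater(cards, target, used):
--     left, right = 0, len(cards) - 1
--     result = -1
--     while left <= right:
--         mid = (left + right) // 2
--         if cards[mid] > target and not used[mid]:
--             result = mid
--             right = mid - 1
--         else:
--             left = mid + 1
--     while result != -1 and used[result]:
--         result += 1
--         if result >= len(cards):
--             return -1
--     return result
-- ===== SOURCE B (Python) =====
-- def find_min_greater(cards, target, used):
--     # Recursive binary search without an accumulator: recurse left on success
--     # and combine on return; then a single scan finds the first unused slot.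
--     def bs(left, right):
--         if left > right:
--             return -1
--         mid = (left + right) // 2
--         if cards[mid] > target and not used[mid]:
--             deeper = bs(left, mid - 1)
--             return mid if deeper == -1 else deeper
--         return bs(mid + 1, right)
--
--     pos = bs(0, len(cards) - 1)
--     if pos == -1:
--         return -1
--     return next((j for j in range(pos, len(cards)) if not used[j]), -1)
-- ===== Notes on version B (the rewrite author's own statement) =====
-- stated objective: alternative
-- what changed: The iterative accumulator-threading binary search becomes a recursive search that combines results on return (prefer the deeper hit, else mid), and the stateful forward fixup while-loop becomes a single first-match scan over range(pos, len(cards)).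
-- outside the precondition, e.g. on find_min_greater([1], 5, []): A returns -1, B returns -1
import Mathlib
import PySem

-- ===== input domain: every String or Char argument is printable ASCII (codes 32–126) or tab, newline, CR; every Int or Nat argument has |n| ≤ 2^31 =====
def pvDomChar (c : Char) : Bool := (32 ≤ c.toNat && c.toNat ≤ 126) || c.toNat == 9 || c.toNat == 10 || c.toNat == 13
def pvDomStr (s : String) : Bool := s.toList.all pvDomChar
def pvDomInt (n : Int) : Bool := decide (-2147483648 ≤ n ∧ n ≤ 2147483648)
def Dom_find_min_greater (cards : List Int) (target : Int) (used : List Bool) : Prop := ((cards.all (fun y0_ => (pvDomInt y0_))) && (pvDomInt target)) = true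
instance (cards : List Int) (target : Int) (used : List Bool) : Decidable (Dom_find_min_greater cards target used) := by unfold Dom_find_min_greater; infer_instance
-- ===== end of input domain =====

-- B replaces A's accumulator-threading iterative binary search by a recursive search that
-- combines on return, and A's stateful forward fixup loop by a first-match scan (alternative).
-- ===== PORT A =====
-- the while-loop with state (left, right, result), as tail recursion over the same state
def pvLoopA (cards : List Int) (target : Int) (used : List Bool) (left right result : Int) : Int :=
  if h : left ≤ right then
    let mid := PySem.Int.floordiv (left + right) 2
    if PySem.List.pyGetD cards mid 0 > target ∧ PySem.List.pyGetD used mid false = false then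
      pvLoopA cards target used left (mid - 1) mid
    else
      pvLoopA cards target used (mid + 1) right result
  else result
termination_by (right - left + 1).toNat
decreasing_by
  all_goals
    have h2 := PySem.Int.floordiv_two_mid_bounds (lo := left) (hi := right) h
    omega

-- the forward fixup: while result != -1 and used[result]: result += 1; if result >= len: return -1
def pvFixA (cards : List Int) (used : List Bool) (result : Int) : Int :=
  if h : result ≠ -1 ∧ PySem.List.pyGetD used result false = true then
    if hge : result + 1 ≥ (cards.length : Int) then -1
    else pvFixA cards used (result + 1)
  else result
termination_by ((cards.length : Int) - result).toNat
decreasing_by omega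

def find_min_greater (cards : List Int) (target : Int) (used : List Bool) : Int :=
  pvFixA cards used (pvLoopA cards target used 0 ((cards.length : Int) - 1) (-1))

-- ===== PORT B =====
-- recursive binary search, no accumulator: prefer the deeper hit, else mid
def pvBsB (cards : List Int) (target : Int) (used : List Bool) (left right : Int) : Int :=
  if h : left > right then -1
  else
    let mid := PySem.Int.floordiv (left + right) 2
    if PySem.List.pyGetD cards mid 0 > target ∧ PySem.List.pyGetD used mid false = false then
      let deeper := pvBsB cards target used left (mid - 1)
      if deeper = -1 then mid else deeper
    else pvBsB cards target used (mid + 1) right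
termination_by (right - left + 1).toNat
decreasing_by
  all_goals
    have h2 := PySem.Int.floordiv_two_mid_bounds (lo := left) (hi := right) (by omega)
    omega

def find_min_greater_alt (cards : List Int) (target : Int) (used : List Bool) : Int :=
  let pos := pvBsB cards target used 0 ((cards.length : Int) - 1)
  if pos = -1 then -1
  else
    -- next((j for j in range(pos, len(cards)) if not used[j]), -1)
    (((PySem.List.pyRange pos (cards.length : Int) 1).find?
        (fun j => !PySem.List.pyGetD used j false)).getD (-1))

-- ===== PRECONDITION & SPEC =====
-- Pre_ excludes inputs where used is too short to cover a probed index, on which Python's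
-- used[mid]/used[result] raises IndexError; a few such inputs still return (the probe
-- short-circuits on cards[mid] > target) and are excluded with them.
def Pre_find_min_greater (cards : List Int) (target : Int) (used : List Bool) : Prop :=
  cards.length ≤ used.length
instance (cards : List Int) (target : Int) (used : List Bool) : Decidable (Pre_find_min_greater cards target used) := by unfold Pre_find_min_greater; infer_instance

def pvWitness_find_min_greater : List Int × Int × List Bool := ([5, 7, 9], 6, [false, true, false])

def Spec_find_min_greater (cards : List Int) (target : Int) (used : List Bool) (out : Int) : Prop := out = find_min_greater_alt cards target used
instance (cards : List Int) (target : Int) (used : List Bool) (out : Int) : Decidable (Spec_find_min_greater cards target used out) := by unfold Spec_find_min_greater; infer_instance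

-- ===== CLAIM (what is proved, stated in full; the proofs are below) =====
def Claim_equal_find_min_greater : Prop := ∀ (cards : List Int) (target : Int) (used : List Bool), Dom_find_min_greater cards target used → Pre_find_min_greater cards target used → Spec_find_min_greater cards target used (find_min_greater cards target used)

-- ===== LEMMAS AND PROOFS =====

-- A's loop with accumulator equals B's combine-on-return search
lemma pvLoop_eq_bs (cards : List Int) (target : Int) (used : List Bool) :
    ∀ (k : Nat) (left right result : Int), (right - left + 1).toNat ≤ k → 0 ≤ left →
      pvLoopA cards target used left right result =
        (if pvBsB cards target used left right = -1 then result
         else pvBsB cards target used left right) := by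
  intro k
  induction k with
  | zero =>
    intro left right result hk hl
    rw [pvLoopA, pvBsB, dif_neg (by omega : ¬ left ≤ right), dif_pos (by omega : left > right)]
    simp
  | succ k ih =>
    intro left right result hk hl
    by_cases hlr : left ≤ right
    · rw [pvLoopA, pvBsB, dif_pos hlr, dif_neg (by omega : ¬ left > right)]
      have hb := PySem.Int.floordiv_two_mid_bounds (lo := left) (hi := right) hlr
      set mid := PySem.Int.floordiv (left + right) 2 with hmid
      by_cases hcond : PySem.List.pyGetD cards mid 0 > target ∧
          PySem.List.pyGetD used mid false = false
      · rw [if_pos hcond, if_pos hcond,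
            ih left (mid - 1) mid (by omega) hl]
        by_cases hd : pvBsB cards target used left (mid - 1) = -1
        · rw [if_pos hd, if_neg (by omega : ¬ mid = -1)]
        · rw [if_neg hd, if_neg hd]
      · rw [if_neg hcond, if_neg hcond,
            ih (mid + 1) right result (by omega) (by omega)]
    · rw [pvLoopA, pvBsB, dif_neg hlr, dif_pos (by omega : left > right)]
      simp

-- range of B's binary-search result
lemma pvBs_range (cards : List Int) (target : Int) (used : List Bool) :
    ∀ (k : Nat) (left right : Int), (right - left + 1).toNat ≤ k →
      pvBsB cards target used left right = -1 ∨
        (left ≤ pvBsB cards target used left right ∧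
         pvBsB cards target used left right ≤ right) := by
  intro k
  induction k with
  | zero =>
    intro left right hk
    rw [pvBsB, dif_pos (by omega : left > right)]
    left; rfl
  | succ k ih =>
    intro left right hk
    by_cases hlr : left > right
    · rw [pvBsB, dif_pos hlr]; left; rfl
    · rw [pvBsB, dif_neg hlr]
      have hb := PySem.Int.floordiv_two_mid_bounds (lo := left) (hi := right) (by omega)
      set mid := PySem.Int.floordiv (left + right) 2 with hmid
      by_cases hcond : PySem.List.pyGetD cards mid 0 > target ∧
          PySem.List.pyGetD used mid false = false
      · rw [if_pos hcond]
        by_cases hd : pvBsB cards target used left (mid - 1) = -1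
        · rw [if_pos hd]; right; constructor <;> omega
        · rw [if_neg hd]
          rcases ih left (mid - 1) (by omega) with h1 | ⟨h1, h2⟩
          · exact absurd h1 hd
          · right; constructor <;> omega
      · rw [if_neg hcond]
        rcases ih (mid + 1) right (by omega) with h1 | ⟨h1, h2⟩
        · left; exact h1
        · right; constructor <;> omega

-- A's fixup loop equals B's first-match scan over range(result, len(cards))
lemma pvFix_eq_scan (cards : List Int) (used : List Bool) :
    ∀ (n : Nat) (result : Int),
      ((cards.length : Int) - result).toNat ≤ n →
      0 ≤ result → result < (cards.length : Int) →
      pvFixA cards used result =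
        (((PySem.List.pyRange result (cards.length : Int) 1).find?
            (fun j => !PySem.List.pyGetD used j false)).getD (-1)) := by
  intro n
  induction n with
  | zero => intro result hn h0 hlt; omega
  | succ n ih =>
    intro result hn h0 hlt
    rw [pvFixA, PySem.List.pyRange_one_cons hlt]
    by_cases hu : PySem.List.pyGetD used result false = true
    · rw [dif_pos (⟨by omega, hu⟩ :
          result ≠ -1 ∧ PySem.List.pyGetD used result false = true),
          List.find?_cons_of_neg (by simp [hu])]
      by_cases hend : result + 1 ≥ (cards.length : Int)
      · rw [dif_pos hend]
        have he : PySem.List.pyRange (result + 1) (cards.length : Int) 1 = [] := by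
          rw [PySem.List.pyRange_one]
          have h0' : ((cards.length : Int) - (result + 1)).toNat = 0 := by omega
          simp [h0']
        simp [he]
      · rw [dif_neg hend, ih (result + 1) (by omega) (by omega) (by omega)]
    · have hu' : PySem.List.pyGetD used result false = false := by
        simpa using hu
      rw [dif_neg (fun hc => hu hc.2),
          List.find?_cons_of_pos (by simp [hu'])]
      rfl

-- ===== VERDICT (by name: the statement is the Claim_ definition above) =====
theorem find_min_greater_spec : Claim_equal_find_min_greater := by
  intro cards target used _hdom _hpre
  unfold Spec_find_min_greater find_min_greater find_min_greater_alt
  rw [pvLoop_eq_bs cards target used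
      (((cards.length : Int) - 1 - 0 + 1).toNat) 0 ((cards.length : Int) - 1) (-1)
      le_rfl le_rfl]
  by_cases hpos : pvBsB cards target used 0 ((cards.length : Int) - 1) = -1
  · rw [if_pos hpos, if_pos hpos, pvFixA]
    simp
  · rcases pvBs_range cards target used
        (((cards.length : Int) - 1 - 0 + 1).toNat) 0 ((cards.length : Int) - 1) le_rfl with
      h | ⟨h1, h2⟩
    · exact absurd h hpos
    · rw [if_neg hpos, if_neg hpos]
      exact pvFix_eq_scan cards used
        (((cards.length : Int) - pvBsB cards target used 0 ((cards.length : Int) - 1)).toNat)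
        _ le_rfl h1 (by omega)
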